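-- pv_equiv track=rewrite | github.com/neurodata/brainlit | brainlit/utils/single_machine_upload.py | get_data_ranges
-- ===== SOURCE A (Python) =====
-- def get_data_ranges(bin_path, chunk_size):
--     """Get ranges (x,y,z) for chunks to be stitched together in volume
--
--     Arguments:
--         bin_path {list} -- binary paths to tif files
--         chunk_size {list} -- 3 ints for original tif image dimensions
--     Returns:
--         x_range {list} -- x-coord int bounds for volume stitch
--         y_range {list} -- y-coord int bounds for volume stitch
--         z_range {list} -- z-coord int bounds for volume stitch
--     """
--     x_curr, y_curr, z_curr = 0, 0, 0
--     tree_level = len(bin_path)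
--     for idx, i in enumerate(bin_path):
--         scale_factor = 2 ** (tree_level - idx - 1)
--         x_curr += int(i[2]) * chunk_size[0] * scale_factor
--         y_curr += int(i[1]) * chunk_size[1] * scale_factor
--         # flip z axis so chunks go anterior to posterior
--         z_curr += int(i[0]) * chunk_size[2] * scale_factor
--     x_range = [x_curr, x_curr + chunk_size[0]]
--     y_range = [y_curr, y_curr + chunk_size[1]]
--     z_range = [z_curr, z_curr + chunk_size[2]]
--     return x_range, y_range, z_range
-- ===== SOURCE B (Python) =====
-- def get_data_ranges(bin_path, chunk_size):
--     # One generic per-axis helper: traverse the path back-to-front with a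
--     # doubling weight accumulator; run it once per axis.
--     def origin(pos):
--         total, weight = 0, 1
--         for s in reversed(bin_path):
--             total += int(s[pos]) * weight
--             weight *= 2
--         return total
--
--     def rng(pos, size):
--         start = origin(pos) * size
--         return [start, start + size]
--
--     return rng(2, chunk_size[0]), rng(1, chunk_size[1]), rng(0, chunk_size[2])
-- ===== Notes on version B (the rewrite author's own statement) =====
-- stated objective: alternative
-- what changed: Replaces A's single forward loop with three accumulators and a recomputed 2**(tree_level-idx-1) power per step by a generic per-axis helper that traverses the path back-to-front with a doubling weight accumulator, run once per axis and scaled by chunk_size afterwards.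
import Mathlib
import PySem

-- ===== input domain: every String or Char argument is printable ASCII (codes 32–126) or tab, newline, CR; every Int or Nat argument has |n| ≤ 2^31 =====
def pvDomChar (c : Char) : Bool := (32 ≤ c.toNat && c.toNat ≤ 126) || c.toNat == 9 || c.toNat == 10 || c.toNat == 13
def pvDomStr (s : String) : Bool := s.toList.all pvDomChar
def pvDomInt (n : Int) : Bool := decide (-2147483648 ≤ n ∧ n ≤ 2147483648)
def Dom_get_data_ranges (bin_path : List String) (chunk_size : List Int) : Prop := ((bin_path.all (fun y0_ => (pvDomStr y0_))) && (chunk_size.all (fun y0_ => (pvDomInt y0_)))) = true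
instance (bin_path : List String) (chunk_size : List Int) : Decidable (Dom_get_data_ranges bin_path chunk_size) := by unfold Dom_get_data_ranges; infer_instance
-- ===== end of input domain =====

-- B replaces A's forward loop with per-step powers by a per-axis back-to-front pass with a doubling weight; return value only, no mutation.

-- int(i[k]) for the one-character string i[k]; total form, exact on Pre_ inputs (index in range, digit char)
def pvIntAt (s : String) (k : Int) : Int :=
  (((PySem.Str.pyGet? s k).bind (fun c => PySem.Int.ofChars? [c])).getD 0)

-- ===== PORT A =====
-- the for-loop of A: state (x_curr, y_curr, z_curr), explicit idx counter from enumerate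
def pvALoop (tree_level : Nat) (c0 c1 c2 : Int) : Nat → List String → Int → Int → Int → Int × Int × Int
  | _, [], x, y, z => (x, y, z)
  | idx, i :: rest, x, y, z =>
    let scale_factor : Int := 2 ^ (tree_level - idx - 1)   -- exponent is the Nat tree_level - idx - 1, nonneg since idx < tree_level
    pvALoop tree_level c0 c1 c2 (idx + 1) rest
      (x + pvIntAt i 2 * c0 * scale_factor)
      (y + pvIntAt i 1 * c1 * scale_factor)
      (z + pvIntAt i 0 * c2 * scale_factor)

def get_data_ranges (bin_path : List String) (chunk_size : List Int) : List Int × List Int × List Int :=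
  let c0 := PySem.List.pyGetD chunk_size 0 0
  let c1 := PySem.List.pyGetD chunk_size 1 0
  let c2 := PySem.List.pyGetD chunk_size 2 0
  let tree_level := bin_path.length
  let st := pvALoop tree_level c0 c1 c2 0 bin_path 0 0 0
  ([st.1, st.1 + c0], [st.2.1, st.2.1 + c1], [st.2.2, st.2.2 + c2])

-- ===== PORT B =====
-- B's inner helper 'origin': loop over reversed(bin_path) with state (total, weight)
def pvOriginLoop (pos : Int) : List String → Int → Int → Int
  | [], total, _ => total
  | s :: rest, total, weight => pvOriginLoop pos rest (total + pvIntAt s pos * weight) (weight * 2)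

def pvOrigin (pos : Int) (bin_path : List String) : Int := pvOriginLoop pos bin_path.reverse 0 1

-- B's helper 'rng'
def pvRng (bin_path : List String) (pos size : Int) : List Int :=
  let start := pvOrigin pos bin_path * size
  [start, start + size]

def get_data_ranges_alt (bin_path : List String) (chunk_size : List Int) : List Int × List Int × List Int :=
  (pvRng bin_path 2 (PySem.List.pyGetD chunk_size 0 0),
   pvRng bin_path 1 (PySem.List.pyGetD chunk_size 1 0),
   pvRng bin_path 0 (PySem.List.pyGetD chunk_size 2 0))

-- ===== PRECONDITION & SPEC =====
-- Pre_ excludes exactly the inputs where the Python A raises: chunk_size with fewer than 3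
-- entries (IndexError) or a path string lacking a digit at position 0, 1 or 2 (IndexError/ValueError).
def pvIsDigit (c : Char) : Bool := 48 ≤ c.toNat && c.toNat ≤ 57
def Pre_get_data_ranges (bin_path : List String) (chunk_size : List Int) : Prop :=
  (decide (3 ≤ chunk_size.length) &&
   bin_path.all (fun s => decide (3 ≤ s.toList.length) && (s.toList.take 3).all pvIsDigit)) = true
instance (bin_path : List String) (chunk_size : List Int) : Decidable (Pre_get_data_ranges bin_path chunk_size) := by unfold Pre_get_data_ranges; infer_instance

def pvWitness_get_data_ranges : List String × List Int := (["101", "010"], [10, 20, 30])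

def Spec_get_data_ranges (bin_path : List String) (chunk_size : List Int) (out : List Int × List Int × List Int) : Prop := out = get_data_ranges_alt bin_path chunk_size
instance (bin_path : List String) (chunk_size : List Int) (out : List Int × List Int × List Int) : Decidable (Spec_get_data_ranges bin_path chunk_size out) := by unfold Spec_get_data_ranges; infer_instance

-- ===== CLAIM (what is proved, stated in full; the proofs are below) =====
def Claim_equal_get_data_ranges : Prop := ∀ (bin_path : List String) (chunk_size : List Int), Dom_get_data_ranges bin_path chunk_size → Pre_get_data_ranges bin_path chunk_size → Spec_get_data_ranges bin_path chunk_size (get_data_ranges bin_path chunk_size)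

-- ===== LEMMAS AND PROOFS =====

-- the weight loop over an appended list splits
theorem pvOriginLoop_append (pos : Int) (l1 l2 : List String) : ∀ (t w : Int),
    pvOriginLoop pos (l1 ++ l2) t w =
      pvOriginLoop pos l2 (pvOriginLoop pos l1 t w) (w * 2 ^ l1.length) := by
  induction l1 with
  | nil => intro t w; simp [pvOriginLoop]
  | cons s rest ih =>
    intro t w
    simp only [List.cons_append, pvOriginLoop, List.length_cons, ih]
    ring_nf

-- peel the head of the path: its digit carries weight 2^(length of the tail)
theorem pvOrigin_cons (pos : Int) (i : String) (rest : List String) :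
    pvOrigin pos (i :: rest) = pvIntAt i pos * 2 ^ rest.length + pvOrigin pos rest := by
  unfold pvOrigin
  rw [show (i :: rest).reverse = rest.reverse ++ [i] by simp]
  rw [pvOriginLoop_append]
  simp [pvOriginLoop]
  ring

-- A's loop from offset idx equals B's per-axis origins scaled by the chunk sizes
theorem pvALoop_eq (c0 c1 c2 : Int) (n : Nat) :
    ∀ (l : List String) (idx : Nat) (x y z : Int), idx + l.length = n →
    pvALoop n c0 c1 c2 idx l x y z =
      (x + pvOrigin 2 l * c0, y + pvOrigin 1 l * c1, z + pvOrigin 0 l * c2) := by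
  intro l
  induction l with
  | nil => intro idx x y z _; simp [pvALoop, pvOrigin, pvOriginLoop]
  | cons i rest ih =>
    intro idx x y z hn
    simp only [List.length_cons] at hn
    have hpow : n - idx - 1 = rest.length := by omega
    simp only [pvALoop, hpow]
    rw [ih (idx + 1) _ _ _ (by omega)]
    simp only [pvOrigin_cons]
    refine Prod.ext ?_ (Prod.ext ?_ ?_) <;> simp <;> ring

-- ===== VERDICT (by name: the statement is the Claim_ definition above) =====
theorem get_data_ranges_spec : Claim_equal_get_data_ranges := by
  intro bin_path chunk_size _ _
  unfold Spec_get_data_ranges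
  simp only [get_data_ranges, get_data_ranges_alt, pvRng]
  rw [pvALoop_eq _ _ _ bin_path.length bin_path 0 0 0 0 (by omega)]
  simp
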